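-- pv_equiv track=rewrite | github.com/alihoseini2002/Logic-Analyzer | Logic_Analyzer.py | generate_inter
-- ===== SOURCE A (Python) =====
-- def generate_inter(truthtable_a,truthtable_b):
--     interpolator=[""]
--     for i in range(len(truthtable_a)):
--         if(truthtable_a[i]==truthtable_b[i]):
--             for j in range(len(interpolator)):
--                 interpolator[j]+=truthtable_a[i]
--         else:
--             tmp=interpolator.copy()
--             for j in range(len(interpolator)):
--                 interpolator[j]+="F"
--             for j in range(len(interpolator)):
--                 tmp[j]+="T"
--             interpolator=interpolator+tmp
--     return interpolator
-- ===== SOURCE B (Python) =====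
-- def generate_inter(truthtable_a, truthtable_b):
--     # One pass to record the cells: the agreeing string at agreeing positions,
--     # None at differing positions (k of them); then enumerate n in range(2**k),
--     # bit j of n choosing T/F at the j-th differing position (bit 0 = first).
--     cells = []
--     k = 0
--     for i in range(len(truthtable_a)):
--         a = truthtable_a[i]
--         if a == truthtable_b[i]:
--             cells.append(a)
--         else:
--             cells.append(None)
--             k += 1
--     result = []
--     for n in range(2 ** k):
--         s = ""
--         j = 0
--         for c in cells:
--             if c is None:
--                 s += "T" if (n >> j) & 1 else "F"
--                 j += 1
--             else:
--                 s += c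
--         result.append(s)
--     return result
-- ===== Notes on version B (the rewrite author's own statement) =====
-- stated objective: alternative
-- what changed: A repeatedly doubles and re-extends the whole interpolator list (copying every partial string at each differing position); B makes one classification pass recording agreeing strings vs differing positions and then directly enumerates the 2^k bit patterns, building each output string once with bit j of n choosing T/F at the j-th differing position.
import Mathlib
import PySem

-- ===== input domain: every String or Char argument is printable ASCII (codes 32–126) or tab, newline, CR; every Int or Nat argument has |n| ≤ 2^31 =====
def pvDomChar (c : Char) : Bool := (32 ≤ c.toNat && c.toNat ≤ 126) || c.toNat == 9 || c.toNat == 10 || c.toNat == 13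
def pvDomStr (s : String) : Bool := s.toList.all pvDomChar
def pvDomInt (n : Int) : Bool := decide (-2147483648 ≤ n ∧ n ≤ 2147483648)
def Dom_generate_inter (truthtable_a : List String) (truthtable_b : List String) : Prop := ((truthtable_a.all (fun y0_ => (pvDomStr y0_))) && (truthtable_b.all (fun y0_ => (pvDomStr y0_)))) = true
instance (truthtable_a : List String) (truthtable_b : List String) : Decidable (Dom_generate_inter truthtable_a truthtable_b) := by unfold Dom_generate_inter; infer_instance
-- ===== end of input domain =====

-- B replaces A's repeated list-doubling (copy the whole interpolator list at every
-- differing position) by one classification pass followed by a direct enumeration of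
-- the 2^k bit patterns, building each output string once (alternative decomposition).

-- ===== PORT A =====
def generate_inter (truthtable_a : List String) (truthtable_b : List String) : List String :=
  (PySem.List.pyRange 0 (PySem.List.len truthtable_a) 1).foldl
    (fun interpolator i =>
      let ai := PySem.List.pyGetD truthtable_a i ""
      let bi := PySem.List.pyGetD truthtable_b i ""
      if ai == bi then
        -- for j in range(len(interpolator)): interpolator[j] += truthtable_a[i]
        interpolator.map (fun s => s ++ ai)
      else
        -- tmp = copy; interpolator[j] += "F"; tmp[j] += "T"; interpolator + tmp
        interpolator.map (fun s => s ++ "F") ++ interpolator.map (fun s => s ++ "T"))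
    [""]

-- ===== PORT B =====
def generate_inter_alt (truthtable_a : List String) (truthtable_b : List String) : List String :=
  -- pass 1: cells (some = agreeing string, none = differing position), k = number of nones
  let p := (PySem.List.pyRange 0 (PySem.List.len truthtable_a) 1).foldl
    (fun (st : List (Option String) × Nat) i =>
      let a := PySem.List.pyGetD truthtable_a i ""
      if a == PySem.List.pyGetD truthtable_b i "" then (st.1 ++ [some a], st.2)
      else (st.1 ++ [none], st.2 + 1))
    ([], 0)
  -- pass 2: for n in range(2**k) build one string, bit j of n at the j-th none
  (List.range (2 ^ p.2)).foldl
    (fun result n =>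
      let s := p.1.foldl
        (fun (st : String × Nat) c =>
          match c with
          | none => (st.1 ++ (if (n >>> st.2) &&& 1 == 1 then "T" else "F"), st.2 + 1)
          | some c => (st.1 ++ c, st.2))
        ("", 0)
      result ++ [s.1])
    []

-- ===== PRECONDITION & SPEC =====
-- Pre_ excludes exactly the inputs where Python raises IndexError: truthtable_b
-- shorter than truthtable_a (both A and B index truthtable_b[i] for i < len(truthtable_a)).
def Pre_generate_inter (truthtable_a : List String) (truthtable_b : List String) : Prop :=
  truthtable_a.length ≤ truthtable_b.length
instance (truthtable_a : List String) (truthtable_b : List String) : Decidable (Pre_generate_inter truthtable_a truthtable_b) := by unfold Pre_generate_inter; infer_instance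

def pvWitness_generate_inter : List String × List String := (["1", "0", "1"], ["1", "1", "1"])

def Spec_generate_inter (truthtable_a : List String) (truthtable_b : List String) (out : List String) : Prop := out = generate_inter_alt truthtable_a truthtable_b
instance (truthtable_a : List String) (truthtable_b : List String) (out : List String) : Decidable (Spec_generate_inter truthtable_a truthtable_b out) := by unfold Spec_generate_inter; infer_instance

-- ===== CLAIM (what is proved, stated in full; the proofs are below) =====
def Claim_equal_generate_inter : Prop := ∀ (truthtable_a : List String) (truthtable_b : List String), Dom_generate_inter truthtable_a truthtable_b → Pre_generate_inter truthtable_a truthtable_b → Spec_generate_inter truthtable_a truthtable_b (generate_inter truthtable_a truthtable_b)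

-- ===== LEMMAS AND PROOFS =====

-- the cell at position i: the agreeing string, or none at a differing position
def giCell (ta tb : List String) (i : Nat) : Option String :=
  let a := ta.getD i ""
  if a == tb.getD i "" then some a else none

-- A's loop body as a function of the cell
def giStep (interp : List String) : Option String → List String
  | some a => interp.map (fun s => s ++ a)
  | none => interp.map (fun s => s ++ "F") ++ interp.map (fun s => s ++ "T")

-- the common semantics: all completions of a cell list, earliest 'none' varying fastest
def giEnum : List (Option String) → List String
  | [] => [""]
  | some c :: cs => (giEnum cs).map (fun t => c ++ t)
  | none :: cs => (giEnum cs).flatMap (fun t => ["F" ++ t, "T" ++ t])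

-- the string B builds for pattern n
def giBuild : List (Option String) → Nat → String
  | [], _ => ""
  | some c :: cs, n => c ++ giBuild cs n
  | none :: cs, n => (if n % 2 = 1 then "T" else "F") ++ giBuild cs (n / 2)

lemma gi_foldA (cs : List (Option String)) : ∀ interp : List String,
    cs.foldl giStep interp = (giEnum cs).flatMap (fun t => interp.map (fun s => s ++ t)) := by
  induction cs with
  | nil => intro interp; simp [giEnum, String.append_empty]
  | cons c cs ih =>
    intro interp
    cases c with
    | some a =>
      simp only [List.foldl_cons, giStep, ih, giEnum, List.flatMap_map]
      simp [List.map_map, Function.comp_def, String.append_assoc]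
    | none =>
      simp only [List.foldl_cons, giStep, ih, giEnum, List.flatMap_assoc]
      simp [List.map_map, Function.comp_def, String.append_assoc]

lemma gi_A_eq (ta tb : List String) :
    generate_inter ta tb = ((List.range ta.length).map (giCell ta tb)).foldl giStep [""] := by
  unfold generate_inter
  rw [PySem.List.len_eq, PySem.List.pyRange_zero_natCast, List.foldl_map, List.foldl_map]
  congr 1
  funext interp i
  simp only [PySem.List.pyGetD_natCast, giStep, giCell]
  split <;> rfl

lemma gi_pass1 (ta tb : List String) (l : List Nat) :
    ∀ (acc : List (Option String)) (k : Nat),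
    l.foldl (fun (st : List (Option String) × Nat) i =>
        let a := ta.getD i ""
        if a == tb.getD i "" then (st.1 ++ [some a], st.2)
        else (st.1 ++ [none], st.2 + 1)) (acc, k)
      = (acc ++ l.map (giCell ta tb),
         k + (l.map (giCell ta tb)).countP (fun c => c.isNone)) := by
  induction l with
  | nil => intro acc k; simp
  | cons i l ih =>
    intro acc k
    simp only [List.foldl_cons, List.map_cons, List.countP_cons, giCell]
    split
    · rw [ih]; simp
    · rw [ih]; simp; omega

lemma gi_walk (n : Nat) (cs : List (Option String)) : ∀ (s : String) (j : Nat),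
    (cs.foldl (fun (st : String × Nat) c =>
        match c with
        | none => (st.1 ++ (if (n >>> st.2) &&& 1 == 1 then "T" else "F"), st.2 + 1)
        | some c => (st.1 ++ c, st.2)) (s, j)).1
      = s ++ giBuild cs (n >>> j) := by
  induction cs with
  | nil => intro s j; simp [giBuild, String.append_empty]
  | cons c cs ih =>
    intro s j
    cases c with
    | some a =>
      simp only [List.foldl_cons, ih, giBuild, String.append_assoc]
    | none =>
      simp only [List.foldl_cons, ih, giBuild, String.append_assoc]
      rw [← Nat.shiftRight_succ, Nat.and_one_is_mod]
      congr 2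
      by_cases h : (n >>> j) % 2 = 1 <;> simp [h]

lemma gi_split (K : Nat) (g : Nat → Nat → String) :
    (List.range (2 * K)).map (fun n => g (n % 2) (n / 2))
      = (List.range K).flatMap (fun m => [g 0 m, g 1 m]) := by
  induction K with
  | zero => simp
  | succ K ih =>
    have h2 : 2 * (K + 1) = (2 * K + 1) + 1 := by omega
    rw [h2, List.range_succ, List.range_succ, List.range_succ]
    simp only [List.map_append, List.flatMap_append, ih, List.map_cons, List.map_nil,
      List.flatMap_cons, List.flatMap_nil]
    have e1 : (2 * K) % 2 = 0 := by omega
    have e2 : (2 * K) / 2 = K := by omega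
    have e3 : (2 * K + 1) % 2 = 1 := by omega
    have e4 : (2 * K + 1) / 2 = K := by omega
    rw [e1, e2, e3, e4]
    simp

lemma gi_enum (cs : List (Option String)) :
    (List.range (2 ^ cs.countP (fun c => c.isNone))).map (giBuild cs) = giEnum cs := by
  induction cs with
  | nil => simp [giEnum, giBuild]
  | cons c cs ih =>
    cases c with
    | some a =>
      have hc : (some a :: cs).countP (fun c => c.isNone) = cs.countP (fun c => c.isNone) := by
        simp
      rw [hc]
      simp only [giEnum, ← ih, List.map_map]
      apply List.map_congr_left
      intro n _
      rfl
    | none =>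
      have hc : ((none : Option String) :: cs).countP (fun c => c.isNone)
          = cs.countP (fun c => c.isNone) + 1 := by simp
      have hpow : 2 ^ (cs.countP (fun c => c.isNone) + 1)
          = 2 * 2 ^ (cs.countP (fun c => c.isNone)) := by ring
      rw [hc, hpow]
      have hsplit := gi_split (2 ^ (cs.countP (fun c => c.isNone)))
        (fun b m => (if b = 1 then "T" else "F") ++ giBuild cs m)
      have hb : giBuild (none :: cs)
          = fun n => (if n % 2 = 1 then "T" else "F") ++ giBuild cs (n / 2) := by
        funext n; rfl
      rw [hb, hsplit]
      simp only [giEnum, ← ih, List.flatMap_map]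
      apply List.flatMap_congr
      intro m _
      simp

lemma gi_B_eq (ta tb : List String) :
    generate_inter_alt ta tb
      = (List.range (2 ^ (((List.range ta.length).map (giCell ta tb)).countP (fun c => c.isNone)))).map
          (giBuild ((List.range ta.length).map (giCell ta tb))) := by
  unfold generate_inter_alt
  rw [PySem.List.len_eq, PySem.List.pyRange_zero_natCast, List.foldl_map]
  have h1 := gi_pass1 ta tb (List.range ta.length) [] 0
  simp only [PySem.List.pyGetD_natCast] at *
  rw [h1]
  simp only [List.nil_append, Nat.zero_add]
  rw [PySem.List.foldl_append_singleton_eq_map]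
  simp only [List.nil_append]
  apply List.map_congr_left
  intro n _
  rw [gi_walk]
  simp [String.empty_append]

-- ===== VERDICT (by name: the statement is the Claim_ definition above) =====
theorem generate_inter_spec : Claim_equal_generate_inter := by
  intro ta tb _ _
  unfold Spec_generate_inter
  rw [gi_A_eq, gi_B_eq, gi_foldA, gi_enum]
  simp [String.empty_append]
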